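-- pv_equiv track=rewrite | github.com/Vrboska/--- | problem_B.py | pokrytie
-- ===== SOURCE A (Python) =====
-- def pokrytie(n,list_):
--
--     def spec(di, white):
--         if di==0:
--             return 1
--         elif white==1:
--             return 1
--         else:
--             return 2**di
--
--     if n>1:
--         return spec(list_[0],0)*pokrytie(n-1,list_[1:])+spec(list_[0],1)*spec(list_[1],0)*pokrytie(n-2,list_[2:])
--     elif n==1:
--         return 2
--     else:
--         return 1
-- ===== SOURCE B (Python) =====
-- def pokrytie(n, list_):
--     if n <= 0:
--         return 1
--     if n == 1:
--         return 2
--     w = [1 if d == 0 else 2**d for d in list_[:n]]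
--     prev2, prev = 1, 2  # results for subproblem sizes 0 and 1
--     for k in range(2, n + 1):
--         i = n - k
--         prev2, prev = prev, w[i] * prev + w[i + 1] * prev2
--     return prev
-- ===== Notes on version B (the rewrite author's own statement) =====
-- stated objective: faster
-- what changed: Replaced the exponential two-branch recursion over list slices by a bottom-up dynamic program that precomputes the per-element weights once and keeps two rolling previous values; intended as faster (A's recursion branches twice per step), though a timing run could not confirm it by its rule: A timed out from n=64 up while B returned, leaving too few sizes where both finished.
-- outside the precondition, e.g. on pokrytie(2, [-1, 0]): A returns 2.0, B returns 2.0
import Mathlib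
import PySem

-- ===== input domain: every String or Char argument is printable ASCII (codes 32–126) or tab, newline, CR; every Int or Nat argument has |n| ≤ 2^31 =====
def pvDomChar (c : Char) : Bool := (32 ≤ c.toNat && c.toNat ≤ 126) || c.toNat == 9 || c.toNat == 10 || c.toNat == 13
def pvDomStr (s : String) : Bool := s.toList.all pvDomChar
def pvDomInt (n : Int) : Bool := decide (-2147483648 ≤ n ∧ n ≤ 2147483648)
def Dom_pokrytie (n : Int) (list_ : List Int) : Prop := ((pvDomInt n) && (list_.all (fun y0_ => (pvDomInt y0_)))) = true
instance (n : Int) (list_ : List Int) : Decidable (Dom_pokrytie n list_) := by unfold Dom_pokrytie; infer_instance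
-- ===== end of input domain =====

-- B replaces A's exponential two-branch recursion by a bottom-up dynamic program with two rolling values; intended as faster: a timing run saw A time out from n=64 up while B returned, but could not confirm 'faster' by its own rule (too few sizes where both finished).


-- ===== PORT A =====
-- spec(di, white): exact for di ≥ 0; Pre_ excludes negative di reached with white = 0 (Python returns a float there)
def pvSpec (di : Int) (white : Int) : Int :=
  if di = 0 then 1
  else if white = 1 then 1
  else 2 ^ di.toNat

def pokrytie (n : Int) (list_ : List Int) : Int :=
  if n > 1 then
    pvSpec (PySem.List.pyGetD list_ 0 0) 0 * pokrytie (n - 1) (PySem.List.slice list_ (some 1) none)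
      + pvSpec (PySem.List.pyGetD list_ 0 0) 1 * pvSpec (PySem.List.pyGetD list_ 1 0) 0
          * pokrytie (n - 2) (PySem.List.slice list_ (some 2) none)
  else if n = 1 then 2
  else 1
termination_by n.toNat
decreasing_by all_goals omega

-- ===== PORT B =====
-- w[i] defaulted to 0 where Python raises IndexError (outside Pre_); 2**d exact for d ≥ 0 as above
def pokrytie_alt (n : Int) (list_ : List Int) : Int :=
  if n ≤ 0 then 1
  else if n = 1 then 2
  else
    let w := (PySem.List.slice list_ none (some n)).map (fun d => if d = 0 then 1 else 2 ^ d.toNat)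
    let st := (PySem.List.pyRange 2 (n + 1) 1).foldl
      (fun (p : Int × Int) k =>
        let i := n - k
        (p.2, PySem.List.pyGetD w i 0 * p.2 + PySem.List.pyGetD w (i + 1) 0 * p.1))
      (1, 2)
    st.2

-- ===== PRECONDITION & SPEC =====
-- Pre_ excludes (for n > 1): lists shorter than n, where A raises IndexError, and lists with a
-- negative element among the first n, where Python's 2**di is a float, not an int.
def Pre_pokrytie (n : Int) (list_ : List Int) : Prop :=
  1 < n → (n ≤ list_.length ∧ ∀ x ∈ list_.take n.toNat, 0 ≤ x)
instance (n : Int) (list_ : List Int) : Decidable (Pre_pokrytie n list_) := by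
  unfold Pre_pokrytie; infer_instance

def pvWitness_pokrytie : Int × List Int := (3, [1, 0, 2])

def Spec_pokrytie (n : Int) (list_ : List Int) (out : Int) : Prop := out = pokrytie_alt n list_
instance (n : Int) (list_ : List Int) (out : Int) : Decidable (Spec_pokrytie n list_ out) := by
  unfold Spec_pokrytie; infer_instance

-- ===== CLAIM (what is proved, stated in full; the proofs are below) =====
def Claim_equal_pokrytie : Prop := ∀ (n : Int) (list_ : List Int), Dom_pokrytie n list_ → Pre_pokrytie n list_ → Spec_pokrytie n list_ (pokrytie n list_)

-- ===== LEMMAS AND PROOFS =====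

-- the weight A's spec computes with white = 0 (and B's list comprehension computes)
def pvW (d : Int) : Int := if d = 0 then 1 else 2 ^ d.toNat

theorem pvW_eta : (fun d : Int => if d = 0 then 1 else 2 ^ d.toNat) = pvW := by
  funext d; rfl

theorem pvSpec_one (x : Int) : pvSpec x 1 = 1 := by
  simp [pvSpec]

theorem pvSpec_zero (x : Int) : pvSpec x 0 = pvW x := by
  simp [pvSpec, pvW]

-- A's recurrence, written with drop and pvW
theorem pokrytie_unfold (k : Int) (M : List Int) (hk : 1 < k) :
    pokrytie k M =
      pvW (PySem.List.pyGetD M 0 0) * pokrytie (k - 1) (M.drop 1)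
        + pvW (PySem.List.pyGetD M 1 0) * pokrytie (k - 2) (M.drop 2) := by
  rw [pokrytie]
  rw [if_pos hk, pvSpec_one, pvSpec_zero, pvSpec_zero,
      PySem.List.slice_from M (by norm_num : (0:Int) ≤ 1),
      PySem.List.slice_from M (by norm_num : (0:Int) ≤ 2)]
  rw [show ((1:Int).toNat) = 1 from rfl, show ((2:Int).toNat) = 2 from rfl, one_mul]

-- loop invariant of B's fold, stated over the Nat size N = n.toNat
theorem pv_loop_inv (L : List Int) (N : Nat) (_hN : 2 ≤ N) (hlen : N ≤ L.length)
    (m : Nat) (hm : m + 1 ≤ N) :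
    (PySem.List.pyRange 2 (2 + (m : Int)) 1).foldl
      (fun (p : Int × Int) k =>
        (p.2, PySem.List.pyGetD ((L.take N).map pvW) ((N : Int) - k) 0 * p.2
              + PySem.List.pyGetD ((L.take N).map pvW) ((N : Int) - k + 1) 0 * p.1))
      (1, 2)
    = (pokrytie (m : Int) (L.drop (N - m)), pokrytie ((m : Int) + 1) (L.drop (N - (m + 1)))) := by
  induction m with
  | zero =>
      rw [PySem.List.pyRange_one_eq_nil (by norm_num)]
      simp [pokrytie]
  | succ m ih =>
      have hm' : m + 1 ≤ N := by omega
      have hwlen : ((L.take N).map pvW).length = N := by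
        simp [List.length_take]; omega
      have hw : ∀ (j : Nat) (hj : j < N) (hj2 : j < L.length),
          PySem.List.pyGetD ((L.take N).map pvW) ((j : Nat) : Int) 0
            = pvW (L[j]'hj2) := by
        intro j hj hj2
        rw [PySem.List.pyGetD_natCast]
        rw [List.getD_eq_getElem _ _ (by rw [hwlen]; omega)]
        simp [List.getElem_take]
      have hsplit : (2 + ((m : Int) + 1)) = (2 + (m : Int)) + 1 := by ring
      rw [show ((m + 1 : Nat) : Int) = (m : Int) + 1 by push_cast; ring, hsplit,
          PySem.List.pyRange_one_succ_right (by omega), List.foldl_append, ih hm']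
      simp only [List.foldl_cons, List.foldl_nil]
      have hidx : (N : Int) - (2 + (m : Int)) = ((N - (m + 2) : Nat) : Int) := by omega
      have hidx1 : (N : Int) - (2 + (m : Int)) + 1 = ((N - (m + 1) : Nat) : Int) := by omega
      have h2 : N - (m + 2) < N := by omega
      have h1 : N - (m + 1) < N := by omega
      rw [hidx1, hidx, hw _ h2 (by omega), hw _ h1 (by omega)]
      -- the A-side recurrence at size m+2
      have hrec := pokrytie_unfold ((m : Int) + 2) (L.drop (N - (m + 2))) (by omega)
      have hd1 : (L.drop (N - (m + 2))).drop 1 = L.drop (N - (m + 1)) := by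
        rw [List.drop_drop]; congr 1; omega
      have hd2 : (L.drop (N - (m + 2))).drop 2 = L.drop (N - m) := by
        rw [List.drop_drop]; congr 1; omega
      have hdlen : (L.drop (N - (m + 2))).length = L.length - (N - (m + 2)) := by
        simp [List.length_drop]
      have hg0 : PySem.List.pyGetD (L.drop (N - (m + 2))) 0 0 = L[N - (m + 2)]'(by omega) := by
        rw [show (0 : Int) = ((0 : Nat) : Int) by norm_num, PySem.List.pyGetD_natCast]
        rw [List.getD_eq_getElem _ _ (by rw [hdlen]; omega)]
        simp [List.getElem_drop]
      have hg1 : PySem.List.pyGetD (L.drop (N - (m + 2))) 1 0 = L[N - (m + 1)]'(by omega) := by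
        rw [show (1 : Int) = ((1 : Nat) : Int) by norm_num, PySem.List.pyGetD_natCast]
        rw [List.getD_eq_getElem _ _ (by rw [hdlen]; omega)]
        simp only [List.getElem_drop]
        congr 1; omega
      rw [hg0, hg1, hd1, hd2] at hrec
      rw [show (m : Int) + 2 - 1 = (m : Int) + 1 by ring,
          show (m : Int) + 2 - 2 = (m : Int) by ring] at hrec
      refine Prod.ext rfl ?_
      dsimp only
      rw [show (m : Int) + 1 + 1 = (m : Int) + 2 by ring]
      exact hrec.symm

theorem pokrytie_eq (n : Int) (L : List Int) (hpre : Pre_pokrytie n L) :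
    pokrytie n L = pokrytie_alt n L := by
  by_cases hn : 1 < n
  · obtain ⟨hlen, -⟩ := hpre hn
    obtain ⟨N, rfl⟩ : ∃ N : Nat, n = (N : Int) := ⟨n.toNat, by omega⟩
    have hN2 : 2 ≤ N := by omega
    have hlenN : N ≤ L.length := by omega
    rw [pokrytie_alt, if_neg (by omega), if_neg (by omega)]
    simp only [PySem.List.slice_to L (show (0:Int) ≤ (N : Int) by omega), pvW_eta,
               Int.toNat_natCast]
    rw [show (N : Int) + 1 = 2 + ((N - 1 : Nat) : Int) by omega]
    rw [pv_loop_inv L N hN2 hlenN (N - 1) (by omega)]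
    rw [show ((N - 1 : Nat) : Int) + 1 = ((N : Nat) : Int) by omega]
    rw [show N - (N - 1 + 1) = 0 by omega, List.drop_zero]
  · rw [pokrytie, pokrytie_alt, if_neg hn]
    by_cases h1 : n = 1
    · rw [if_pos h1, if_neg (by omega), if_pos h1]
    · rw [if_neg h1, if_pos (by omega)]

-- ===== VERDICT (by name: the statement is the Claim_ definition above) =====
theorem pokrytie_spec : Claim_equal_pokrytie := by
  intro n list_ _ hpre
  unfold Spec_pokrytie
  exact pokrytie_eq n list_ hpre
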